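-- pv_equiv track=rewrite | github.com/vvtkfkddl11/algorithms | 프로그래머스/1/92334. 신고 결과 받기/신고 결과 받기.py | solution
-- ===== SOURCE A (Python) =====
-- from collections import defaultdict
--
-- def solution(id_list, report, k):
--     answer = []
--     report = list(set(report))  # 중복 신고 제거
--     dic_report = defaultdict(set)  # 신고자 - 신고 받은 사람 (report와 같은 set형으로 맞춰줌)
--     dic_count = {}  # 신고 받은 사람 - 신고 받은 횟수 / defaultdict(set)
--
--     for i in id_list:
--         dic_count[i] = 0
--
--     for i in report:
--         sender, receiver = i.split()
--         dic_report[sender].add(receiver)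
--         dic_count[receiver] += 1
--
--     for i in id_list:
--         temp = 0
--         for j in dic_report[i]:
--             if dic_count[j] >= k:
--                 temp += 1
--         answer.append(temp)
--
--     return answer
-- ===== SOURCE B (Python) =====
-- def solution(id_list, report, k):
--     pairs = [tuple(r.split()) for r in set(report)]
--     banned = [u for u in id_list if sum(1 for _, t in pairs if t == u) >= k]
--     return [len({t for s, t in pairs if s == i and t in banned}) for i in id_list]
-- ===== Notes on version B (the rewrite author's own statement) =====
-- stated objective: alternative
-- what changed: Drops all dicts and incremental counting: B splits the deduped reports into a flat pair list once, then decides bans by recounting each user's received reports directly over that list, and builds each answer entry by a direct set-comprehension count of that user's banned targets (quadratic recount instead of A's dict accumulation).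
import Mathlib
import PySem

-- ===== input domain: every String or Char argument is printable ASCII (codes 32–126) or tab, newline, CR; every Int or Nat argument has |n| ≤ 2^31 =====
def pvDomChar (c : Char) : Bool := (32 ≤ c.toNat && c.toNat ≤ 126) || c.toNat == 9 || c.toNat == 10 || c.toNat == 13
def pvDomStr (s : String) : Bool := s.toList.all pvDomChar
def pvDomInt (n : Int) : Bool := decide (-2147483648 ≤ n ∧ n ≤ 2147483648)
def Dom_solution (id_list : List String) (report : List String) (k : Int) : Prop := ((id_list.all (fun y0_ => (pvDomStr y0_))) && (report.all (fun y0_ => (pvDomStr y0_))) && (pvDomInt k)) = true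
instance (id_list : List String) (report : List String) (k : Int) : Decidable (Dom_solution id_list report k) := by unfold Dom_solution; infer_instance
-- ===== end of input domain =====

-- B drops A's dicts and incremental counting entirely: it flattens the deduped reports into a
-- pair list once and recounts directly over it, per user (objective: alternative).

-- ===== PORT A =====
-- step of A's loop 'for i in report: sender, receiver = i.split(); …'
-- (a report string that does not split into exactly two words makes Python raise ValueError:
--  such inputs are outside Pre_solution; the port leaves the state unchanged there)
def aStep (st : PySem.Dict String (PySem.Set String) × PySem.Dict String Int) (r : String) :
    PySem.Dict String (PySem.Set String) × PySem.Dict String Int :=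
  match PySem.Str.split₀ r with
  | [s, t] => (st.1.insert s (PySem.Set.add (st.1.getD s PySem.Set.empty) t),
               st.2.insert t (st.2.getD t 0 + 1))
  | _ => st

def solution (id_list : List String) (report : List String) (k : Int) : List Int :=
  let rep := PySem.Set.ofList report
  let dicCount0 := id_list.foldl (fun d i => d.insert i (0 : Int)) PySem.Dict.empty
  let st := rep.foldl aStep (PySem.Dict.empty, dicCount0)
  -- 'for i in id_list: temp = 0; for j in dic_report[i]: if dic_count[j] >= k: temp += 1; answer.append(temp)'
  -- (dic_report is a defaultdict(set): a missing key reads as the empty set; dic_count[j] is a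
  --  plain lookup ported with getD, exact because every j iterated was inserted by the counting loop)
  id_list.foldl (fun answer i =>
    answer ++ [((st.1.getD i PySem.Set.empty).foldl
      (fun temp j => if k ≤ st.2.getD j 0 then temp + 1 else temp) (0 : Int))]) []

-- ===== PORT B =====
-- 'tuple(r.split())' of B, for the two-word strings Pre_solution admits
-- (on any other string B's comprehensions raise ValueError when unpacking: outside Pre_solution)
def bPair (r : String) : String × String :=
  match PySem.Str.split₀ r with
  | [s, t] => (s, t)
  | _ => ("", "")

def solution_alt (id_list : List String) (report : List String) (k : Int) : List Int :=
  -- pairs = [tuple(r.split()) for r in set(report)]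
  let pairs := (PySem.Set.ofList report).map bPair
  -- banned = [u for u in id_list if sum(1 for _, t in pairs if t == u) >= k]
  let banned := id_list.filter (fun u => k ≤ (pairs.countP (fun p => p.2 == u) : Int))
  -- [len({t for s, t in pairs if s == i and t in banned}) for i in id_list]
  id_list.map (fun i =>
    ((PySem.Set.ofList ((pairs.filter (fun p => p.1 == i && decide (p.2 ∈ banned))).map Prod.snd)).length : Int))

-- ===== PRECONDITION & SPEC =====
-- Pre_ excludes exactly the inputs where Python A raises: a report string that does not split
-- into exactly two words (ValueError on unpacking) or whose receiver is not in id_list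
-- (KeyError in the plain dic_count dict).
def Pre_solution (id_list : List String) (report : List String) (_k : Int) : Prop :=
  ∀ r ∈ report, (PySem.Str.split₀ r).length = 2 ∧ (PySem.Str.split₀ r).getD 1 "" ∈ id_list
instance (id_list : List String) (report : List String) (k : Int) : Decidable (Pre_solution id_list report k) := by unfold Pre_solution; infer_instance
def pvWitness_solution : List String × List String × Int :=
  (["muzi", "frodo", "apeach"], ["muzi frodo", "apeach frodo", "muzi frodo"], 2)

def Spec_solution (id_list : List String) (report : List String) (k : Int) (out : List Int) : Prop := out = solution_alt id_list report k
instance (id_list : List String) (report : List String) (k : Int) (out : List Int) : Decidable (Spec_solution id_list report k out) := by unfold Spec_solution; infer_instance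

-- ===== CLAIM (what is proved, stated in full; the proofs are below) =====
def Claim_equal_solution : Prop := ∀ (id_list : List String) (report : List String) (k : Int), Dom_solution id_list report k → Pre_solution id_list report k → Spec_solution id_list report k (solution id_list report k)

-- ===== LEMMAS AND PROOFS =====

-- A's combined fold is two independent folds
def aRep (d : PySem.Dict String (PySem.Set String)) (r : String) : PySem.Dict String (PySem.Set String) :=
  match PySem.Str.split₀ r with
  | [s, t] => d.insert s (PySem.Set.add (d.getD s PySem.Set.empty) t)
  | _ => d

def cntStep (d : PySem.Dict String Int) (r : String) : PySem.Dict String Int :=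
  match PySem.Str.split₀ r with
  | [_, t] => d.insert t (d.getD t 0 + 1)
  | _ => d

def pairStep (P : PySem.Set (String × String)) (r : String) : PySem.Set (String × String) :=
  match PySem.Str.split₀ r with
  | [s, t] => PySem.Set.add P (s, t)
  | _ => P

theorem aStep_eq (st : PySem.Dict String (PySem.Set String) × PySem.Dict String Int) (r : String) :
    aStep st r = (aRep st.1 r, cntStep st.2 r) := by
  unfold aStep aRep cntStep
  rcases h : PySem.Str.split₀ r with _ | ⟨s, _ | ⟨t, _ | _⟩⟩ <;> rfl

theorem foldl_aStep (l : List String) (d : PySem.Dict String (PySem.Set String)) (c : PySem.Dict String Int) :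
    l.foldl aStep (d, c) = (l.foldl aRep d, l.foldl cntStep c) := by
  have : l.foldl aStep (d, c) = l.foldl (fun st r => (aRep st.1 r, cntStep st.2 r)) (d, c) := by
    apply PySem.List.foldl_congr_mem; intro acc x _; exact aStep_eq acc x
  rw [this, PySem.List.foldl_prod_mk]

-- the central invariant on A: its per-sender receiver sets are the fibres of the pair set
theorem report_fibre (l : List String) (dR : PySem.Dict String (PySem.Set String))
    (P : PySem.Set (String × String))
    (h : ∀ i, dR.getD i PySem.Set.empty = (P.filter (fun p => p.1 == i)).map Prod.snd) :
    ∀ i, (l.foldl aRep dR).getD i PySem.Set.empty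
        = ((l.foldl pairStep P).filter (fun p => p.1 == i)).map Prod.snd := by
  induction l generalizing dR P with
  | nil => exact h
  | cons r l ih =>
    apply ih
    intro i
    unfold aRep pairStep
    rcases hs : PySem.Str.split₀ r with _ | ⟨s, _ | ⟨t, _ | _⟩⟩ <;> dsimp only
    · exact h i
    · exact h i
    · by_cases hi : i = s
      · subst hi
        rw [PySem.Dict.getD_insert_self]
        have hmem : t ∈ dR.getD i PySem.Set.empty ↔ (i, t) ∈ P := by
          rw [h i]
          simp only [List.mem_map, List.mem_filter]
          constructor
          · rintro ⟨p, ⟨hpP, hp1⟩, hp2⟩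
            have hpit : p = (i, t) := by
              cases p; simp only at hp2; simp only [beq_iff_eq] at hp1
              simp only [hp1, hp2]
            rwa [hpit] at hpP
          · intro hP; exact ⟨(i, t), ⟨hP, by simp⟩, rfl⟩
        rw [PySem.Set.add_eq_ite, PySem.Set.add_eq_ite]
        by_cases ht : (i, t) ∈ P
        · rw [if_pos ht, if_pos (hmem.mpr ht), h i]
        · rw [if_neg ht, if_neg (fun hc => ht (hmem.mp hc)), h i,
            List.filter_append, List.map_append]
          simp
      · rw [PySem.Dict.getD_insert, if_neg hi]
        rw [PySem.Set.add_eq_ite]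
        by_cases ht : (s, t) ∈ P
        · rw [if_pos ht]; exact h i
        · rw [if_neg ht, List.filter_append, h i]
          have hst : ((s, t).1 == i) = false := by
            simp only [beq_eq_false_iff_ne]; exact fun hc => hi hc.symm
          simp [hst]
    · exact h i

-- under Pre_, the pair-set fold is set(map bPair l)
theorem foldl_pairStep_eq (l : List String)
    (h : ∀ r ∈ l, (PySem.Str.split₀ r).length = 2) :
    l.foldl pairStep PySem.Set.empty = PySem.Set.ofList (l.map bPair) := by
  rw [PySem.Set.ofList_eq_foldl, List.foldl_map]
  apply PySem.List.foldl_congr_mem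
  intro acc r hr
  unfold pairStep bPair
  rcases hs : PySem.Str.split₀ r with _ | ⟨s, _ | ⟨t, _ | _⟩⟩ <;>
    first
    | rfl
    | (exfalso; have := h r hr; rw [hs] at this; simp at this)

-- under Pre_, the counting fold counts receivers
theorem foldl_cntStep_eq (l : List String) (c : PySem.Dict String Int)
    (h : ∀ r ∈ l, (PySem.Str.split₀ r).length = 2) (u : String) :
    (l.foldl cntStep c).getD u 0 = c.getD u 0 + (((l.map bPair).map Prod.snd).count u : Int) := by
  have step : l.foldl cntStep c
      = ((l.map bPair).map Prod.snd).foldl (fun d x => d.insert x (d.getD x 0 + 1)) c := by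
    rw [List.foldl_map, List.foldl_map]
    apply PySem.List.foldl_congr_mem
    intro acc r hr
    unfold cntStep bPair
    rcases hs : PySem.Str.split₀ r with _ | ⟨s, _ | ⟨t, _ | _⟩⟩ <;>
      first
      | rfl
      | (exfalso; have := h r hr; rw [hs] at this; simp at this)
  rw [step, PySem.Dict.getD_foldl_insert_add_one]

-- A's initial count dict reads 0 at every key
theorem getD_init_zero (l : List String) (d : PySem.Dict String Int) (u : String)
    (h : d.getD u 0 = 0) :
    (l.foldl (fun d i => d.insert i (0 : Int)) d).getD u 0 = 0 := by
  induction l generalizing d with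
  | nil => exact h
  | cons a l ih =>
    apply ih
    rw [PySem.Dict.getD_insert]
    split_ifs <;> simp [h]

-- every pair of B's pair list has its receiver in id_list and comes from a two-word report
theorem pair_receiver_mem (id_list report : List String) (p : String × String)
    (hPre : Pre_solution id_list report 0)
    (hp : p ∈ (PySem.Set.ofList report).map bPair) : p.2 ∈ id_list := by
  rcases List.mem_map.mp hp with ⟨r, hr, rfl⟩
  have hrR : r ∈ report := (PySem.Set.mem_ofList _ _).mp hr
  obtain ⟨hlen, hmem⟩ := hPre r hrR
  unfold bPair
  rcases hs : PySem.Str.split₀ r with _ | ⟨s, _ | ⟨t, _ | _⟩⟩ <;> rw [hs] at hlen <;>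
    simp at hlen
  rw [hs] at hmem
  simpa using hmem

theorem solution_eq_alt (id_list : List String) (report : List String) (k : Int)
    (hPre : Pre_solution id_list report k) :
    solution id_list report k = solution_alt id_list report k := by
  have hPre0 : Pre_solution id_list report 0 := hPre
  unfold solution solution_alt
  simp only [foldl_aStep]
  set L := PySem.Set.ofList report with hL
  have hsplit : ∀ r ∈ L, (PySem.Str.split₀ r).length = 2 := by
    intro r hr; exact (hPre r ((PySem.Set.mem_ofList _ _).mp hr)).1
  set pairs := L.map bPair with hpairs
  set c0 := id_list.foldl (fun d i => d.insert i (0 : Int)) PySem.Dict.empty with hc0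
  set cnt := L.foldl cntStep c0 with hcnt
  -- the count dict reads the receiver count of B's pair list, at EVERY key
  have hcntD : ∀ u, cnt.getD u 0 = (pairs.countP (fun p => p.2 == u) : Int) := by
    intro u
    rw [hcnt, foldl_cntStep_eq L c0 hsplit u, getD_init_zero id_list PySem.Dict.empty u (by simp),
      zero_add, hpairs]
    simp only [List.count_eq_countP, List.countP_map]; rfl
  set banned := id_list.filter (fun u => k ≤ (pairs.countP (fun p => p.2 == u) : Int)) with hbanned
  -- banned membership, for receivers occurring in pairs
  have hban : ∀ p ∈ pairs, (decide (p.2 ∈ banned)) = decide (k ≤ cnt.getD p.2 0) := by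
    intro p hp
    have hid : p.2 ∈ id_list := pair_receiver_mem id_list report p hPre0 hp
    rw [hcntD p.2, hbanned]
    by_cases hk : k ≤ (pairs.countP (fun q => q.2 == p.2) : Int)
    · simp [List.mem_filter, hid, hk]
    · simp [List.mem_filter, hk]
  rw [PySem.List.foldl_append_singleton_eq_map, List.nil_append]
  apply List.map_congr_left
  intro i _
  -- the A side: count over i's receiver set
  rw [report_fibre L PySem.Dict.empty PySem.Set.empty (by intro i; rfl) i,
    foldl_pairStep_eq L hsplit, PySem.List.foldl_ite_add_one, zero_add, ← hpairs]
  -- both sides count the same distinct receivers: compare the two Nodup lists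
  set q : String → Bool := fun t => decide (k ≤ cnt.getD t 0) with hq
  set Di := ((PySem.Set.ofList pairs).filter (fun p => p.1 == i)).map Prod.snd with hDi
  have hDiNodup : Di.Nodup := by
    rw [hDi]
    apply List.Nodup.map_on
    · intro x hx y hy hxy
      have hx1 : x.1 = i := by simpa using (List.mem_filter.mp hx).2
      have hy1 : y.1 = i := by simpa using (List.mem_filter.mp hy).2
      cases x; cases y
      simp only at hx1 hy1 hxy
      simp [hx1, hy1, hxy]
    · exact List.Nodup.filter _ (PySem.Set.nodup_ofList pairs)
  have hLnd : (Di.filter q).Nodup := List.Nodup.filter _ hDiNodup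
  set R := PySem.Set.ofList ((pairs.filter (fun p => p.1 == i && decide (p.2 ∈ banned))).map Prod.snd) with hR
  have hRnd : R.Nodup := PySem.Set.nodup_ofList _
  have hmemL : ∀ t, t ∈ Di.filter q ↔ ((i, t) ∈ pairs ∧ q t = true) := by
    intro t
    rw [List.mem_filter, hDi]
    constructor
    · rintro ⟨ht, hqt⟩
      rcases List.mem_map.mp ht with ⟨p, hpf, rfl⟩
      have hp1 : p.1 = i := by simpa using (List.mem_filter.mp hpf).2
      have hpP : p ∈ pairs := (PySem.Set.mem_ofList _ _).mp (List.mem_filter.mp hpf).1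
      refine ⟨?_, hqt⟩
      have : p = (i, p.2) := by cases p; simp only at hp1; simp [hp1]
      rwa [this] at hpP
    · rintro ⟨hit, hqt⟩
      refine ⟨List.mem_map.mpr ⟨(i, t), List.mem_filter.mpr ⟨(PySem.Set.mem_ofList _ _).mpr hit, by simp⟩, rfl⟩, hqt⟩
  have hmemR : ∀ t, t ∈ R ↔ ((i, t) ∈ pairs ∧ q t = true) := by
    intro t
    rw [hR, PySem.Set.mem_ofList]
    constructor
    · intro ht
      rcases List.mem_map.mp ht with ⟨p, hpf, rfl⟩
      obtain ⟨hpP, hcond⟩ := List.mem_filter.mp hpf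
      have hp1 : p.1 = i := by
        have := (Bool.and_eq_true _ _).mp hcond
        simpa using this.1
      have hban' := hban p hpP
      have hq2 : q p.2 = true := by
        show decide (k ≤ cnt.getD p.2 0) = true
        rw [← hban']
        exact ((Bool.and_eq_true _ _).mp hcond).2
      refine ⟨?_, hq2⟩
      have : p = (i, p.2) := by cases p; simp only at hp1; simp [hp1]
      rwa [this] at hpP
    · rintro ⟨hit, hqt⟩
      refine List.mem_map.mpr ⟨(i, t), List.mem_filter.mpr ⟨hit, ?_⟩, rfl⟩
      have hb : decide (t ∈ banned) = true := by
        have hban' := hban (i, t) hit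
        simp only at hban'
        rw [hban']; exact hqt
      simp [hb]
  have hperm : (Di.filter q).Perm R := by
    rw [List.perm_ext_iff_of_nodup hLnd hRnd]
    intro t; rw [hmemL t, hmemR t]
  rw [List.countP_eq_length_filter]
  exact_mod_cast congrArg (fun (n : ℕ) => (n : Int)) hperm.length_eq

-- ===== VERDICT (by name: the statement is the Claim_ definition above) =====
theorem solution_spec : Claim_equal_solution := by
  intro id_list report k _ hPre
  unfold Spec_solution
  exact solution_eq_alt id_list report k hPre
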